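-- pv_equiv track=rewrite | github.com/tihamsheikh/python_with_django_euit | hospital_database/user_pass_func.py | removing_repeatation
-- ===== SOURCE A (Python) =====
-- def removing_repeatation(password: str)-> bool:
--     """
--         it blocks user from using same char and setting it as a password
--         at least three different char is needed
--         return -> bool
--     """
--     dict = {}
--     for char in password:
--         if char in dict:
--             dict[char] += 1
--         else:
--             dict[char] = 1
--     most_used_char = max([value for value in dict.values()])
--
--     return most_used_char < len(password)-2
-- ===== SOURCE B (Python) =====
-- def removing_repeatation(password: str) -> bool:
--     # sort the characters, scan the runs of equal chars, compare the longest run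
--     s = sorted(password)
--     runs = []
--     cur = 0
--     prev = None
--     for c in s:
--         if c == prev:
--             cur += 1
--         else:
--             if cur > 0:
--                 runs.append(cur)
--             cur = 1
--             prev = c
--     if cur > 0:
--         runs.append(cur)
--     return max(runs) < len(password) - 2
-- ===== Notes on version B (the rewrite author's own statement) =====
-- stated objective: alternative
-- what changed: Replaces the dict-based character frequency accumulation with sorting the password and a single scan over the sorted characters that tracks run lengths of equal characters, taking the maximal run length.
import Mathlib
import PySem

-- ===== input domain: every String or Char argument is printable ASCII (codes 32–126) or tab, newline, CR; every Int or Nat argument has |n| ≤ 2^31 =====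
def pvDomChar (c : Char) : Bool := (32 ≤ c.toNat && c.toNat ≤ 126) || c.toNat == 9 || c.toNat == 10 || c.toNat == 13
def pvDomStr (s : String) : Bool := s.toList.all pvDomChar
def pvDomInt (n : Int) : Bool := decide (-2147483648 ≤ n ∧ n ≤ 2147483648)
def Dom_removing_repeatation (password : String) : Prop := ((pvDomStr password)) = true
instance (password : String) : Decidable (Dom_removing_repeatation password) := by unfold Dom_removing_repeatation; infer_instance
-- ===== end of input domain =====

-- B replaces the dict frequency count by sort + longest-run scan (alternative decomposition, no speed claim).

-- ===== PORT A =====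
def removing_repeatation (password : String) : Bool :=
  let d := password.toList.foldl
    (fun d c => if d.contains c then d.insert c (d.getD c 0 + 1) else d.insert c 1)
    (PySem.Dict.empty : PySem.Dict Char Int)
  -- max([value for value in dict.values()]) : ValueError on an empty dict → Pre_ excludes ""
  match PySem.List.max? d.values (fun v => v) with
  | some m => decide (m < (password.toList.length : Int) - 2)
  | none => false

-- ===== PORT B =====
-- one fold step of Source B's run scan: state = (prev, cur, runs)
def rrStep (st : Option Char × Int × List Int) (c : Char) : Option Char × Int × List Int :=
  if some c = st.1 then (st.1, st.2.1 + 1, st.2.2)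
  else (some c, 1, if st.2.1 > 0 then st.2.2 ++ [st.2.1] else st.2.2)

def removing_repeatation_alt (password : String) : Bool :=
  let s := PySem.List.sorted password.toList (fun c => c) false
  let st := s.foldl rrStep (none, 0, [])
  let runs := if st.2.1 > 0 then st.2.2 ++ [st.2.1] else st.2.2
  match PySem.List.max? runs (fun v => v) with
  | some m => decide (m < (password.toList.length : Int) - 2)
  | none => false

-- ===== PRECONDITION & SPEC =====
-- Pre_ excludes the empty string, on which A's max([]) raises ValueError (B raises there too).
def Pre_removing_repeatation (password : String) : Prop := password ≠ ""
instance (password : String) : Decidable (Pre_removing_repeatation password) := by unfold Pre_removing_repeatation; infer_instance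
def pvWitness_removing_repeatation : String := "abcd"
def Spec_removing_repeatation (password : String) (out : Bool) : Prop := out = removing_repeatation_alt password
instance (password : String) (out : Bool) : Decidable (Spec_removing_repeatation password out) := by unfold Spec_removing_repeatation; infer_instance

-- ===== CLAIM (what is proved, stated in full; the proofs are below) =====
def Claim_equal_removing_repeatation : Prop := ∀ (password : String), Dom_removing_repeatation password → Pre_removing_repeatation password → Spec_removing_repeatation password (removing_repeatation password)

-- ===== LEMMAS AND PROOFS =====

-- A's if-branches both insert the incremented getD value
theorem rr_foldA_eq_counter (cs : List Char) :
    cs.foldl (fun d c => if d.contains c then d.insert c (d.getD c 0 + 1) else d.insert c 1)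
      (PySem.Dict.empty : PySem.Dict Char Int)
    = PySem.Dict.counter cs := by
  have hstep : ∀ (d : PySem.Dict Char Int) (c : Char),
      (if d.contains c then d.insert c (d.getD c 0 + 1) else d.insert c 1)
        = d.insert c (d.getD c 0 + 1) := by
    intro d c
    by_cases h : d.contains c = true
    · simp [h]
    · rw [if_neg (by simp [h]), PySem.Dict.getD_of_not_contains (h := by simpa using h)]
      norm_num
  rw [show (fun (d : PySem.Dict Char Int) (c : Char) =>
        if d.contains c then d.insert c (d.getD c 0 + 1) else d.insert c 1)
      = (fun d c => d.insert c (d.getD c 0 + 1)) from funext fun d => funext fun c => hstep d c]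
  exact PySem.Dict.foldl_insert_getD_add_one_eq_counter cs

-- generic: the max?-then-compare pattern equals the "all counts below k" predicate
theorem rr_max_lemma (L : List Int) (cs : List Char) (k : Int) (hne : L ≠ [])
    (hmem : ∀ x, x ∈ L ↔ ∃ c ∈ cs, x = (cs.count c : Int)) :
    (match PySem.List.max? L (fun v => v) with
     | some m => decide (m < k)
     | none => false)
    = decide (∀ c ∈ cs, (cs.count c : Int) < k) := by
  cases h : PySem.List.max? L (fun v => v) with
  | none => exact absurd ((PySem.List.max?_eq_none_iff _ _).1 h) hne
  | some m =>
    have hm : m ∈ L := PySem.List.max?_mem h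
    have hmax : ∀ y ∈ L, y ≤ m := PySem.List.max?_isMax h
    simp only []
    rw [decide_eq_decide]
    constructor
    · intro hk c hc
      exact lt_of_le_of_lt (hmax _ ((hmem _).2 ⟨c, hc, rfl⟩)) hk
    · intro hall
      obtain ⟨c, hc, rfl⟩ := (hmem m).1 hm
      exact hall c hc

-- run lengths of a list, run by run
def runLengths : List Char → List Int
  | [] => []
  | c :: t => ((1 + (t.takeWhile (· == c)).length : Nat) : Int) :: runLengths (t.dropWhile (· == c))
  termination_by ys => ys.length
  decreasing_by simpa using Nat.lt_succ_of_le (List.length_dropWhile_le _ _)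

theorem rr_fold_inner (ys : List Char) : ∀ (p : Char) (cur : Int) (runs : List Int), 0 < cur →
    (let st := ys.foldl rrStep (some p, cur, runs)
     if st.2.1 > 0 then st.2.2 ++ [st.2.1] else st.2.2)
    = runs ++ (cur + ((ys.takeWhile (· == p)).length : Int)) :: runLengths (ys.dropWhile (· == p)) := by
  induction ys with
  | nil => intro p cur runs hcur; simp [runLengths, hcur]
  | cons c t ih =>
    intro p cur runs hcur
    by_cases hcp : c = p
    · subst hcp
      have hstep : rrStep (some c, cur, runs) c = (some c, cur + 1, runs) := by
        simp [rrStep]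
      rw [List.foldl_cons, hstep]
      have := ih c (cur + 1) runs (by omega)
      simp only [] at this ⊢
      rw [this]
      simp only [List.takeWhile_cons, List.dropWhile_cons, beq_self_eq_true, if_pos, List.length_cons]
      push_cast
      ring_nf
    · have hstep : rrStep (some p, cur, runs) c = (some c, 1, runs ++ [cur]) := by
        simp [rrStep, hcp, hcur]
      rw [List.foldl_cons, hstep]
      have := ih c 1 (runs ++ [cur]) (by omega)
      simp only [] at this ⊢
      rw [this]
      have hb : (c == p) = false := by simp [hcp]
      simp [hb, runLengths]

theorem rr_fold_runs (ys : List Char) :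
    (let st := ys.foldl rrStep (none, 0, [])
     if st.2.1 > 0 then st.2.2 ++ [st.2.1] else st.2.2) = runLengths ys := by
  cases ys with
  | nil => simp; rw [runLengths]
  | cons c t =>
    have hstep : rrStep (none, 0, []) c = (some c, 1, []) := by simp [rrStep]
    rw [List.foldl_cons, hstep]
    have := rr_fold_inner t c 1 [] (by omega)
    simp only [] at this ⊢
    rw [this, runLengths]
    simp

theorem rr_runLengths_mem (ys : List Char) :
    ys.Pairwise (· ≤ ·) → ∀ x, x ∈ runLengths ys ↔ ∃ c ∈ ys, x = (ys.count c : Int) := by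
  induction ys using runLengths.induct with
  | case1 => intro _ x; rw [runLengths]; simp
  | case2 c t ih =>
    intro hs x
    have htdec : t = t.takeWhile (· == c) ++ t.dropWhile (· == c) :=
      (List.takeWhile_append_dropWhile).symm
    have htail : ∀ y ∈ t, c ≤ y := fun y hy => (List.pairwise_cons.1 hs).1 y hy
    have hst : t.Pairwise (· ≤ ·) := (List.pairwise_cons.1 hs).2
    have htk : ∀ e ∈ t.takeWhile (· == c), e = c := by
      intro e he; simpa using List.mem_takeWhile_imp he
    have hsd : (t.dropWhile (· == c)).Pairwise (· ≤ ·) :=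
      hst.sublist (List.dropWhile_sublist _)
    have hdr : ∀ e ∈ t.dropWhile (· == c), c < e := by
      intro e he
      cases hd : t.dropWhile (· == c) with
      | nil => simp [hd] at he
      | cons d r =>
        have hdne : ¬ (d == c) = true := by
          have := List.head?_dropWhile_not (p := (· == c)) (l := t)
          rw [hd] at this; simpa using this
        have hdt : d ∈ t := (List.dropWhile_sublist _).mem (by rw [hd]; exact List.mem_cons_self)
        have hcd : c < d := lt_of_le_of_ne (htail d hdt) (fun h => hdne (by simp [h]))
        rw [hd] at he
        rcases List.mem_cons.1 he with rfl | hr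
        · exact hcd
        · have hde : d ≤ e := (List.pairwise_cons.1 (hd ▸ hsd)).1 e hr
          exact lt_of_lt_of_le hcd hde
    have hcount_c : ((c :: t).count c : Int) = 1 + ((t.takeWhile (· == c)).length : Int) := by
      rw [List.count_cons_self]
      have h1 : (t.takeWhile (· == c)).count c = (t.takeWhile (· == c)).length :=
        List.count_eq_length.2 (by intro e he; simpa using (htk e he).symm)
      have h2 : (t.dropWhile (· == c)).count c = 0 :=
        List.count_eq_zero.2 (fun hc => absurd rfl (ne_of_gt (hdr c hc)))
      conv_lhs => rw [htdec]
      rw [List.count_append, h1, h2]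
      push_cast; ring
    have hcount_dr : ∀ e ∈ t.dropWhile (· == c),
        ((c :: t).count e : Int) = ((t.dropWhile (· == c)).count e : Int) := by
      intro e he
      have hec : e ≠ c := (ne_of_lt (hdr e he)).symm
      have h1 : (t.takeWhile (· == c)).count e = 0 :=
        List.count_eq_zero.2 (fun hc => hec (htk e hc))
      have h2 : (c :: t).count e = t.count e := by
        simp [Ne.symm hec]
      rw [h2]
      conv_lhs => rw [htdec]
      rw [List.count_append, h1]
      simp
    rw [runLengths]
    constructor
    · intro hx
      rcases List.mem_cons.1 hx with rfl | hx
      · exact ⟨c, List.mem_cons_self, by rw [hcount_c]; push_cast; ring⟩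
      · obtain ⟨e, he, rfl⟩ := ((ih hsd) _).1 hx
        exact ⟨e, List.mem_cons_of_mem _ ((List.dropWhile_sublist _).mem he),
          (hcount_dr e he).symm⟩
    · rintro ⟨e, he, rfl⟩
      rcases List.mem_cons.1 he with rfl | he
      · exact List.mem_cons.2 (Or.inl (by rw [hcount_c]; push_cast; ring))
      · by_cases hec : e = c
        · subst hec
          exact List.mem_cons.2 (Or.inl (by rw [hcount_c]; push_cast; ring))
        · have hed : e ∈ t.dropWhile (· == c) := by
            rcases (List.mem_append.1 (htdec ▸ he)) with h | h
            · exact absurd (htk e h) hec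
            · exact h
          refine List.mem_cons.2 (Or.inr ?_)
          rw [hcount_dr e hed]
          exact ((ih hsd) _).2 ⟨e, hed, rfl⟩

-- ===== VERDICT (by name: the statement is the Claim_ definition above) =====
theorem removing_repeatation_spec : Claim_equal_removing_repeatation := by
  intro password _ hpre
  unfold Spec_removing_repeatation removing_repeatation removing_repeatation_alt
  dsimp only []
  set cs := password.toList with hcs
  have hne : cs ≠ [] := by
    intro h
    exact hpre (String.toList_eq_nil_iff.mp h)
  set k : Int := (cs.length : Int) - 2 with hk
  -- A side
  rw [rr_foldA_eq_counter]
  have hAvals : (PySem.Dict.counter cs).values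
      = (PySem.Set.ofList cs).map (fun c => (cs.count c : Int)) := by
    show ((PySem.Dict.counter cs).items).map (·.2) = _
    rw [PySem.Dict.items_counter, List.map_map]
    rfl
  rw [hAvals]
  have hAne : (PySem.Set.ofList cs).map (fun c => (cs.count c : Int)) ≠ [] := by
    intro h
    rcases List.exists_mem_of_ne_nil cs hne with ⟨c, hc⟩
    have : c ∈ PySem.Set.ofList cs := (PySem.Set.mem_ofList _ _).2 hc
    simp [List.map_eq_nil_iff] at h
    rw [h] at this
    simp at this
  have hAmem : ∀ x, x ∈ (PySem.Set.ofList cs).map (fun c => (cs.count c : Int))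
      ↔ ∃ c ∈ cs, x = (cs.count c : Int) := by
    intro x
    simp only [List.mem_map, PySem.Set.mem_ofList]
    constructor
    · rintro ⟨c, hc, rfl⟩; exact ⟨c, hc, rfl⟩
    · rintro ⟨c, hc, rfl⟩; exact ⟨c, hc, rfl⟩
  rw [rr_max_lemma _ cs k hAne hAmem]
  -- B side
  have hperm : (PySem.List.sorted cs (fun c => c) false).Perm cs := PySem.List.sorted_perm _ _ _
  have hsortne : PySem.List.sorted cs (fun c => c) false ≠ [] := by
    intro h; exact hne ((PySem.List.sorted_eq_nil_iff _ _ _).1 h)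
  have hruns := rr_fold_runs (PySem.List.sorted cs (fun c => c) false)
  dsimp only [] at hruns
  rw [hruns]
  have hBne : runLengths (PySem.List.sorted cs (fun c => c) false) ≠ [] := by
    cases h : PySem.List.sorted cs (fun c => c) false with
    | nil => exact absurd h hsortne
    | cons c t => rw [runLengths]; simp
  have hBmem : ∀ x, x ∈ runLengths (PySem.List.sorted cs (fun c => c) false)
      ↔ ∃ c ∈ cs, x = (cs.count c : Int) := by
    intro x
    rw [rr_runLengths_mem _ (PySem.List.sorted_pairwise _ _) x]
    constructor
    · rintro ⟨c, hc, rfl⟩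
      exact ⟨c, hperm.mem_iff.1 hc, by rw [hperm.count_eq]⟩
    · rintro ⟨c, hc, rfl⟩
      exact ⟨c, hperm.mem_iff.2 hc, by rw [hperm.count_eq]⟩
  rw [rr_max_lemma _ cs k hBne hBmem]
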